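-- pv_equiv track=rewrite | github.com/christophevg/c3 | skills/git-activity-report/scripts/generate-report.py | parse_commit_subject
-- ===== SOURCE A (Python) =====
-- PREFIX_GROUPS = [
--   "feat", "feature",
--   "fix", "bugfix",
--   "docs", "documentation",
--   "refactor",
--   "test", "tests",
--   "chore",
--   "style",
--   "perf", "performance",
--   "build",
--   "ci",
-- ]
--
-- def parse_commit_subject(subject: str) -> tuple[str, str]:
--   """
--   Parse a commit subject into prefix and description.
--
--   Returns:
--     (prefix, description) where prefix may be empty
--   """
--   # Check for conventional commit format: "prefix: description" or "prefix(scope): description"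
--   for prefix in PREFIX_GROUPS:
--     if subject.lower().startswith(prefix + ":"):
--       return prefix, subject[len(prefix)+1:].strip()
--     if subject.lower().startswith(prefix + "("):
--       # Find closing paren
--       idx = subject.find("):")
--       if idx > 0:
--         return prefix, subject[idx+2:].strip()
--
--   return "", subject
-- ===== SOURCE B (Python) =====
-- PREFIXES = {
--   "feat", "feature",
--   "fix", "bugfix",
--   "docs", "documentation",
--   "refactor",
--   "test", "tests",
--   "chore",
--   "style",
--   "perf", "performance",
--   "build",
--   "ci",
-- }
--
-- def parse_commit_subject(subject: str) -> tuple[str, str]: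
--   """
--   Parse a commit subject into prefix and description.
--
--   Returns:
--     (prefix, description) where prefix may be empty
--   """
--   # Single scan for the first separator instead of trying every known prefix.
--   sep = next((i for i, c in enumerate(subject) if c in "(:"), -1)
--   if sep < 0:
--     return "", subject
--   token = subject[:sep].lower()
--   if token not in PREFIXES:
--     return "", subject
--   if subject[sep] == ":":
--     return token, subject[sep+1:].strip()
--   idx = subject.find("):")
--   if idx > 0:
--     return token, subject[idx+2:].strip()
--   return "", subject
-- ===== Notes on version B (the rewrite author's own statement) =====
-- stated objective: idiomatic
-- what changed: A tries all 15 known prefixes, testing two startswith patterns per prefix; B scans the subject once for the first '(' or ':', takes the token before it and does a single membership test in a set of known prefixes.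
import Mathlib
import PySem

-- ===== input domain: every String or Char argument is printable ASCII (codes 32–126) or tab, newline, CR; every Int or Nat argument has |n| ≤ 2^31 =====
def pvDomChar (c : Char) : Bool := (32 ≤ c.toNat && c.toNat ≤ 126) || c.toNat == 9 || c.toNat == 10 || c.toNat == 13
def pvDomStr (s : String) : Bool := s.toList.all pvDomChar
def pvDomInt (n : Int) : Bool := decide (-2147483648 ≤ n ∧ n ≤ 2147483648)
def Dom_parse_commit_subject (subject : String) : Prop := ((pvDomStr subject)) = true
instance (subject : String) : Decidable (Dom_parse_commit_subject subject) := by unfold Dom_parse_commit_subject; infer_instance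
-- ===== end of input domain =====

-- B replaces A's try-every-prefix loop by a single scan for the first '(' or ':' plus one set-membership test (objective: idiomatic).

-- ===== PORT A =====
def pvPrefixGroups : List String :=
  ["feat", "feature", "fix", "bugfix", "docs", "documentation", "refactor",
   "test", "tests", "chore", "style", "perf", "performance", "build", "ci"]

-- the 'for prefix in PREFIX_GROUPS' loop (early return / continue)
def pvGoA (subject : String) : List String → String × String
  | [] => ("", subject)
  | p :: rest =>
    if PySem.Str.startswith (PySem.Str.lower subject) (p ++ ":") then
      (p, PySem.Str.strip (PySem.Str.slice subject (some (PySem.Str.len p + 1)) none))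
    else if PySem.Str.startswith (PySem.Str.lower subject) (p ++ "(") then
      let idx := PySem.Str.find subject "):"
      if idx > 0 then
        (p, PySem.Str.strip (PySem.Str.slice subject (some (idx + 2)) none))
      else pvGoA subject rest
    else pvGoA subject rest

def parse_commit_subject (subject : String) : String × String :=
  pvGoA subject pvPrefixGroups

-- ===== PORT B =====
def pvKnownPrefixes : PySem.Set String :=
  PySem.Set.ofList
    ["feat", "feature", "fix", "bugfix", "docs", "documentation", "refactor",
     "test", "tests", "chore", "style", "perf", "performance", "build", "ci"]

-- next((i for i, c in enumerate(subject) if c in "(:"), -1), as an Option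
def pvFindSep : List Char → Option Nat
  | [] => none
  | c :: cs => if c == '(' || c == ':' then some 0 else (pvFindSep cs).map (· + 1)

def parse_commit_subject_alt (subject : String) : String × String :=
  match pvFindSep subject.toList with
  | none => ("", subject)
  | some i =>
    let token := PySem.Str.lower (PySem.Str.slice subject none (some (i : Int)))
    if PySem.Set.contains pvKnownPrefixes token then
      if subject.toList[i]? = some ':' then
        (token, PySem.Str.strip (PySem.Str.slice subject (some ((i : Int) + 1)) none))
      else
        let idx := PySem.Str.find subject "):"
        if idx > 0 then
          (token, PySem.Str.strip (PySem.Str.slice subject (some (idx + 2)) none))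
        else ("", subject)
    else ("", subject)

-- ===== PRECONDITION & SPEC =====
def Spec_parse_commit_subject (subject : String) (out : String × String) : Prop := out = parse_commit_subject_alt subject
instance (subject : String) (out : String × String) : Decidable (Spec_parse_commit_subject subject out) := by unfold Spec_parse_commit_subject; infer_instance

-- ===== CLAIM (what is proved, stated in full; the proofs are below) =====
def Claim_equal_parse_commit_subject : Prop := ∀ (subject : String), Dom_parse_commit_subject subject → Spec_parse_commit_subject subject (parse_commit_subject subject)

-- ===== LEMMAS AND PROOFS =====

lemma pv_bool_false {b : Bool} (h : ¬ b = true) : b = false := by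
  cases b
  · rfl
  · exact absurd rfl h

-- lowering a character neither creates nor destroys a separator character
lemma pv_lowerChar_eq_sep (c sc : Char) (hsc : sc = '(' ∨ sc = ':') :
    PySem.Chars.lowerChar c = sc ↔ c = sc := by
  constructor
  · intro hh
    by_cases hu : PySem.Chars.isupper c = true
    · exfalso
      simp only [PySem.Chars.lowerChar, hu, if_true] at hh
      have h2 := congrArg Char.toNat hh
      rw [Char.toNat_ofNat] at h2
      have hsc58 : sc.toNat = 40 ∨ sc.toNat = 58 := by
        rcases hsc with rfl | rfl
        · left; rfl
        · right; rfl
      by_cases hv : (c.toNat + 32).isValidChar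
      · simp only [hv, if_true] at h2
        have h8 : c.toNat = 8 ∨ c.toNat = 26 := by omega
        have h4 : c = Char.ofNat 8 ∨ c = Char.ofNat 26 := by
          rcases h8 with h | h
          · left; rw [← Char.ofNat_toNat c, h]
          · right; rw [← Char.ofNat_toNat c, h]
        rcases h4 with h4 | h4 <;> (rw [h4] at hu; exact absurd hu (by decide))
      · simp only [hv, if_false] at h2
        omega
    · simp only [Bool.not_eq_true] at hu
      simpa [PySem.Chars.lowerChar, hu] using hh
  · intro hh
    rcases hsc with rfl | rfl <;> (subst hh; decide)

lemma pv_lowerChar_sep (c : Char) :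
    (PySem.Chars.lowerChar c = '(' ∨ PySem.Chars.lowerChar c = ':') ↔ (c = '(' ∨ c = ':') := by
  rw [pv_lowerChar_eq_sep c '(' (Or.inl rfl), pv_lowerChar_eq_sep c ':' (Or.inr rfl)]

lemma pv_findSep_none {cs : List Char} :
    pvFindSep cs = none ↔ ∀ c ∈ cs, ¬(c = '(' ∨ c = ':') := by
  induction cs with
  | nil => simp [pvFindSep]
  | cons c cs ih =>
    by_cases hc : c = '(' ∨ c = ':'
    · have hb : (c == '(' || c == ':') = true := by rcases hc with rfl | rfl <;> simp
      simp only [pvFindSep, hb, if_true]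
      constructor
      · intro h; exact absurd h (by simp)
      · intro h; exact absurd hc (h c (List.mem_cons_self ..))
    · obtain ⟨h1, h2⟩ := not_or.mp hc
      simp only [pvFindSep]
      rw [if_neg (by simp [h1, h2])]
      constructor
      · intro h x hx
        rcases List.mem_cons.mp hx with rfl | hx
        · exact hc
        · have hn : pvFindSep cs = none := by
            cases hres : pvFindSep cs with
            | none => rfl
            | some j => rw [hres] at h; simp at h
          exact ih.mp hn x hx
      · intro h
        have hn : pvFindSep cs = none := ih.mpr (fun x hx => h x (List.mem_cons_of_mem _ hx))
        rw [hn]; rfl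

lemma pv_findSep_some {cs : List Char} {i : Nat} (h : pvFindSep cs = some i) :
    ∃ c, cs[i]? = some c ∧ (c = '(' ∨ c = ':') ∧ ∀ d ∈ cs.take i, ¬(d = '(' ∨ d = ':') := by
  induction cs generalizing i with
  | nil => simp [pvFindSep] at h
  | cons a cs ih =>
    by_cases hc : a = '(' ∨ a = ':'
    · have hb : (a == '(' || a == ':') = true := by rcases hc with rfl | rfl <;> simp
      simp only [pvFindSep, hb, if_true] at h
      have hi : i = 0 := (Option.some.inj h).symm
      subst hi
      exact ⟨a, rfl, hc, by simp⟩
    · obtain ⟨h1, h2⟩ := not_or.mp hc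
      simp only [pvFindSep] at h
      rw [if_neg (by simp [h1, h2])] at h
      cases hres : pvFindSep cs with
      | none => rw [hres] at h; simp at h
      | some j =>
        rw [hres] at h
        simp only [Option.map_some] at h
        have hji : j + 1 = i := Option.some.inj h
        subst hji
        obtain ⟨c, hc1, hc2, hc3⟩ := ih hres
        refine ⟨c, by simpa using hc1, hc2, ?_⟩
        intro d hd
        rw [List.take_succ_cons] at hd
        rcases List.mem_cons.mp hd with rfl | hd
        · exact hc
        · exact hc3 d hd

lemma pv_findSep_of {cs : List Char} {n : Nat} {c : Char}
    (h1 : cs[n]? = some c) (h2 : c = '(' ∨ c = ':')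
    (h3 : ∀ d ∈ cs.take n, ¬(d = '(' ∨ d = ':')) :
    pvFindSep cs = some n := by
  induction cs generalizing n with
  | nil => simp at h1
  | cons a cs ih =>
    cases n with
    | zero =>
      simp only [List.getElem?_cons_zero, Option.some.injEq] at h1
      subst h1
      simp only [pvFindSep]
      rw [if_pos (by rcases h2 with rfl | rfl <;> simp)]
    | succ n =>
      have ha := h3 a (by simp [List.take_succ_cons])
      obtain ⟨ha1, ha2⟩ := not_or.mp ha
      simp only [pvFindSep]
      rw [if_neg (by simp [ha1, ha2])]
      rw [ih (by simpa using h1) (fun d hd => h3 d (by simp [List.take_succ_cons, hd]))]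
      rfl

-- characterization of A's startswith tests through the first separator position
lemma pv_start_char {cs : List Char} {i : Nat} (hf : pvFindSep cs = some i)
    {p : List Char} (hp : ∀ c ∈ p, ¬(c = '(' ∨ c = ':'))
    {sc : Char} (hsc : sc = '(' ∨ sc = ':') :
    (p ++ [sc]) <+: PySem.Chars.lower cs ↔
      (PySem.Chars.lower (cs.take i) = p ∧ cs[i]? = some sc) := by
  constructor
  · rintro ⟨t, ht⟩
    have hmap : PySem.Chars.lower cs = p ++ sc :: t := by
      rw [← ht]; simp
    have hget : (PySem.Chars.lower cs)[p.length]? = some sc := by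
      rw [hmap, List.getElem?_append_right (le_refl _)]
      simp
    have hget2 : (cs[p.length]?).map PySem.Chars.lowerChar = some sc := by
      rw [← List.getElem?_map]
      exact hget
    obtain ⟨c0, hc0, hc0l⟩ : ∃ c0, cs[p.length]? = some c0 ∧ PySem.Chars.lowerChar c0 = sc := by
      cases hres : cs[p.length]? with
      | none => rw [hres] at hget2; simp at hget2
      | some c0 =>
        rw [hres] at hget2
        simp only [Option.map_some, Option.some.injEq] at hget2
        exact ⟨c0, rfl, hget2⟩
    have hc0sc : c0 = sc := (pv_lowerChar_eq_sep c0 sc hsc).mp hc0l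
    rw [hc0sc] at hc0
    have htake : PySem.Chars.lower (cs.take p.length) = p := by
      have hmt : PySem.Chars.lower (cs.take p.length) = (PySem.Chars.lower cs).take p.length := by
        simp [PySem.Chars.lower, List.map_take]
      rw [hmt, hmap, List.take_left]
    have hbefore : ∀ d ∈ cs.take p.length, ¬(d = '(' ∨ d = ':') := by
      intro d hd
      have hdm : PySem.Chars.lowerChar d ∈ p := by
        rw [← htake]
        exact List.mem_map_of_mem hd
      have := hp _ hdm
      exact fun hcon => this ((pv_lowerChar_sep d).mpr hcon)
    have hiff := pv_findSep_of hc0 hsc hbefore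
    rw [hf] at hiff
    have hip : i = p.length := Option.some.inj hiff
    subst hip
    exact ⟨htake, hc0⟩
  · rintro ⟨h1, h2⟩
    obtain ⟨hlt, hget⟩ := List.getElem?_eq_some_iff.mp h2
    have hdecomp : cs = cs.take i ++ sc :: cs.drop (i + 1) := by
      conv_lhs => rw [← List.take_append_drop i cs]
      rw [List.drop_eq_getElem_cons hlt, hget]
    refine ⟨PySem.Chars.lower (cs.drop (i + 1)), ?_⟩
    have hscl : PySem.Chars.lowerChar sc = sc := by rcases hsc with rfl | rfl <;> decide
    conv_rhs => rw [hdecomp]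
    rw [← h1]
    simp [PySem.Chars.lower, hscl]

-- A's loop skips every prefix whose tests fail (or whose '(' branch finds no "):")
lemma pv_goA_append {subject : String} {l1 l2 : List String}
    (h : ∀ p ∈ l1, PySem.Str.startswith (PySem.Str.lower subject) (p ++ ":") = false ∧
      (PySem.Str.startswith (PySem.Str.lower subject) (p ++ "(") = false ∨
        ¬ PySem.Str.find subject "):" > 0)) :
    pvGoA subject (l1 ++ l2) = pvGoA subject l2 := by
  induction l1 with
  | nil => rfl
  | cons p l1 ih =>
    obtain ⟨ha, hb⟩ := h p (List.mem_cons_self ..)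
    have ih' := ih (fun q hq => h q (List.mem_cons_of_mem _ hq))
    have ha' : ¬(PySem.Str.startswith (PySem.Str.lower subject) (p ++ ":") = true) := by
      rw [ha]; simp
    simp only [List.cons_append, pvGoA]
    rw [if_neg ha']
    rcases hb with hb | hb
    · have hb' : ¬(PySem.Str.startswith (PySem.Str.lower subject) (p ++ "(") = true) := by rw [hb]; simp
      rw [if_neg hb']
      exact ih'
    · by_cases hb2 : PySem.Str.startswith (PySem.Str.lower subject) (p ++ "(") = true
      · rw [if_pos hb2, if_neg hb]
        exact ih'
      · rw [if_neg hb2]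
        exact ih'

lemma pv_goA_skip {subject : String} {ps : List String}
    (h : ∀ p ∈ ps, PySem.Str.startswith (PySem.Str.lower subject) (p ++ ":") = false ∧
      (PySem.Str.startswith (PySem.Str.lower subject) (p ++ "(") = false ∨
        ¬ PySem.Str.find subject "):" > 0)) :
    pvGoA subject ps = ("", subject) := by
  have := pv_goA_append (l2 := []) h
  simpa [pvGoA] using this

set_option maxRecDepth 8192 in
lemma pv_pg_wf_bool : pvPrefixGroups.all (fun p => p.toList.all (fun c => !(c == '(' || c == ':'))) = true := by
  decide

lemma pv_pg_wf : ∀ p ∈ pvPrefixGroups, ∀ c ∈ p.toList, ¬(c = '(' ∨ c = ':') := by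
  intro p hp c hc
  have h2 := List.all_eq_true.mp (List.all_eq_true.mp pv_pg_wf_bool p hp) c hc
  simp only [Bool.not_eq_eq_eq_not, Bool.not_true, Bool.or_eq_false_iff, beq_eq_false_iff_ne] at h2
  rintro (rfl | rfl)
  · exact h2.1 rfl
  · exact h2.2 rfl

set_option maxRecDepth 8192 in
lemma pv_pg_nodup : pvPrefixGroups.Nodup := by decide

set_option maxRecDepth 8192 in
lemma pv_set_eq : pvKnownPrefixes = pvPrefixGroups := by decide

lemma pv_colon_toList : (":" : String).toList = [':'] := by decide

lemma pv_paren_toList : ("(" : String).toList = ['('] := by decide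

lemma pv_alt_none {subject : String} (hf : pvFindSep subject.toList = none) :
    parse_commit_subject_alt subject = ("", subject) := by
  unfold parse_commit_subject_alt
  rw [hf]

lemma pv_alt_some {subject : String} {i : Nat} (hf : pvFindSep subject.toList = some i) :
    parse_commit_subject_alt subject =
      (if PySem.Set.contains pvKnownPrefixes (PySem.Str.lower (PySem.Str.slice subject none (some (i : Int)))) then
        if subject.toList[i]? = some ':' then
          (PySem.Str.lower (PySem.Str.slice subject none (some (i : Int))),
            PySem.Str.strip (PySem.Str.slice subject (some ((i : Int) + 1)) none))
        else
          if PySem.Str.find subject "):" > 0 then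
            (PySem.Str.lower (PySem.Str.slice subject none (some (i : Int))),
              PySem.Str.strip (PySem.Str.slice subject (some (PySem.Str.find subject "):" + 2)) none))
          else ("", subject)
      else ("", subject)) := by
  unfold parse_commit_subject_alt
  rw [hf]

lemma pv_main (subject : String) :
    parse_commit_subject subject = parse_commit_subject_alt subject := by
  unfold parse_commit_subject
  cases hf : pvFindSep subject.toList with
  | none =>
    rw [pv_alt_none hf]
    have hnos : ∀ (q : List Char) (sc : Char), (sc = '(' ∨ sc = ':') →
        ¬ ((q ++ [sc]) <+: PySem.Chars.lower subject.toList) := by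
      rintro q sc hsc ⟨t, ht⟩
      have hmem : sc ∈ PySem.Chars.lower subject.toList := by
        rw [← ht]; simp
      obtain ⟨c0, hc0mem, hc0⟩ := List.mem_map.mp hmem
      have hc0sc : c0 = sc := (pv_lowerChar_eq_sep c0 sc hsc).mp hc0
      subst hc0sc
      exact (pv_findSep_none.mp hf c0 hc0mem) hsc
    apply pv_goA_skip
    intro p _
    constructor
    · apply pv_bool_false
      intro hcon
      rw [PySem.Str.startswith_eq, PySem.Str.toList_lower,
        (by rw [String.toList_append, pv_colon_toList] : (p ++ ":").toList = p.toList ++ [':'])] at hcon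
      exact hnos p.toList ':' (Or.inr rfl) ((PySem.Chars.startswith_iff _ _).mp hcon)
    · left
      apply pv_bool_false
      intro hcon
      rw [PySem.Str.startswith_eq, PySem.Str.toList_lower,
        (by rw [String.toList_append, pv_paren_toList] : (p ++ "(").toList = p.toList ++ ['('])] at hcon
      exact hnos p.toList '(' (Or.inl rfl) ((PySem.Chars.startswith_iff _ _).mp hcon)
  | some i =>
    rw [pv_alt_some hf]
    obtain ⟨c0, hc0, hc0sep, _⟩ := pv_findSep_some hf
    have hlt : i < subject.toList.length := (List.getElem?_eq_some_iff.mp hc0).1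
    set tk := PySem.Str.lower (PySem.Str.slice subject none (some (i : Int))) with htkdef
    have htok : tk.toList = PySem.Chars.lower (subject.toList.take i) := by
      rw [htkdef, PySem.Str.toList_lower, PySem.Str.toList_slice, PySem.Chars.slice_eq_listSlice,
        PySem.List.slice_to _ (by positivity), Int.toNat_natCast]
    have htoklen : tk.toList.length = i := by
      rw [htok]
      simp only [PySem.Chars.lower, List.length_map, List.length_take]
      omega
    have hcondA : ∀ p : String, (∀ c ∈ p.toList, ¬(c = '(' ∨ c = ':')) →
        (PySem.Str.startswith (PySem.Str.lower subject) (p ++ ":") = true ↔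
          (tk = p ∧ subject.toList[i]? = some ':')) := by
      intro p hpw
      rw [PySem.Str.startswith_eq, PySem.Str.toList_lower,
        (by rw [String.toList_append, pv_colon_toList] : (p ++ ":").toList = p.toList ++ [':']),
        PySem.Chars.startswith_iff, pv_start_char hf hpw (Or.inr rfl), ← htok, String.toList_inj]
    have hcondB : ∀ p : String, (∀ c ∈ p.toList, ¬(c = '(' ∨ c = ':')) →
        (PySem.Str.startswith (PySem.Str.lower subject) (p ++ "(") = true ↔
          (tk = p ∧ subject.toList[i]? = some '(')) := by
      intro p hpw
      rw [PySem.Str.startswith_eq, PySem.Str.toList_lower,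
        (by rw [String.toList_append, pv_paren_toList] : (p ++ "(").toList = p.toList ++ ['(']),
        PySem.Chars.startswith_iff, pv_start_char hf hpw (Or.inl rfl), ← htok, String.toList_inj]
    by_cases hm : PySem.Set.contains pvKnownPrefixes tk = true
    · rw [if_pos hm]
      have hmem : tk ∈ pvPrefixGroups := by
        rw [pv_set_eq] at hm
        simpa [PySem.Set.contains] using hm
      obtain ⟨l1, l2, hsplit⟩ := List.append_of_mem hmem
      have hnd := pv_pg_nodup
      rw [hsplit] at hnd
      obtain ⟨_, hnd2, hdisj⟩ := List.nodup_append.mp hnd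
      have hnl1 : tk ∉ l1 := fun hx => hdisj tk hx tk List.mem_cons_self rfl
      have hnl2 : tk ∉ l2 := (List.nodup_cons.mp hnd2).1
      have hwtok : ∀ c ∈ tk.toList, ¬(c = '(' ∨ c = ':') := pv_pg_wf tk hmem
      rw [hsplit]
      rw [pv_goA_append (by
        intro p hp
        have hpmem : p ∈ pvPrefixGroups := by
          rw [hsplit]; exact List.mem_append_left _ hp
        have hpw := pv_pg_wf p hpmem
        have hpne : tk ≠ p := fun h => hnl1 (h ▸ hp)
        refine ⟨pv_bool_false (fun hcon => hpne ((hcondA p hpw).mp hcon).1), Or.inl ?_⟩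
        exact pv_bool_false (fun hcon => hpne ((hcondB p hpw).mp hcon).1))]
      by_cases hy : subject.toList[i]? = some ':'
      · have hA : PySem.Str.startswith (PySem.Str.lower subject) (tk ++ ":") = true :=
          (hcondA tk hwtok).mpr ⟨rfl, hy⟩
        simp only [pvGoA]
        rw [if_pos hA, if_pos hy]
        have hlen : PySem.Str.len tk = (i : Int) := by rw [PySem.Str.len_eq, htoklen]
        rw [hlen]
      · have hyc : subject.toList[i]? = some '(' := by
          rcases hc0sep with h | h
          · rw [h] at hc0; exact hc0
          · exact absurd (h ▸ hc0) hy
        have hA' : ¬(PySem.Str.startswith (PySem.Str.lower subject) (tk ++ ":") = true) :=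
          fun hcon => hy ((hcondA tk hwtok).mp hcon).2
        have hB : PySem.Str.startswith (PySem.Str.lower subject) (tk ++ "(") = true :=
          (hcondB tk hwtok).mpr ⟨rfl, hyc⟩
        simp only [pvGoA]
        rw [if_neg hA', if_pos hB, if_neg hy]
        by_cases hidx : PySem.Str.find subject "):" > 0
        · rw [if_pos hidx, if_pos hidx]
        · rw [if_neg hidx, if_neg hidx]
          apply pv_goA_skip
          intro p hp
          have hpmem : p ∈ pvPrefixGroups := by
            rw [hsplit]
            exact List.mem_append_right _ (List.mem_cons_of_mem _ hp)
          have hpw := pv_pg_wf p hpmem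
          have hpne : tk ≠ p := fun h => hnl2 (h ▸ hp)
          refine ⟨pv_bool_false (fun hcon => hpne ((hcondA p hpw).mp hcon).1), Or.inl ?_⟩
          exact pv_bool_false (fun hcon => hpne ((hcondB p hpw).mp hcon).1)
    · rw [if_neg hm]
      have hnmem : tk ∉ pvPrefixGroups := by
        rw [pv_set_eq] at hm
        intro hx
        exact hm (by simpa [PySem.Set.contains] using hx)
      apply pv_goA_skip
      intro p hp
      have hpw := pv_pg_wf p hp
      have hpne : tk ≠ p := fun h => hnmem (h ▸ hp)
      refine ⟨pv_bool_false (fun hcon => hpne ((hcondA p hpw).mp hcon).1), Or.inl ?_⟩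
      exact pv_bool_false (fun hcon => hpne ((hcondB p hpw).mp hcon).1)

-- ===== VERDICT (by name: the statement is the Claim_ definition above) =====
theorem parse_commit_subject_spec : Claim_equal_parse_commit_subject := by
  intro subject _
  unfold Spec_parse_commit_subject
  exact pv_main subject
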